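-- pv_equiv track=rewrite | github.com/AyushAgnihotri2025/CP-Solutions | GeeksforGeeks/Python3/Medium/Transform String/transform-string.py | transform
-- ===== SOURCE A (Python) =====
-- def transform(A, B):
--     #code here.
--     d = dict()
--     for ch in A:
--         d[ch] = d.get(ch, 0) + 1
--     for ch in B:
--         d[ch] = d.get(ch, 0) - 1
--     if any(d.values()):
--         return -1
--
--     j = len(B) - 1
--     for ch in A[::-1]:
--         if B[j] == ch:
--             j -= 1
--     return j + 1
-- ===== SOURCE B (Python) =====
-- def _is_subseq(s, t):
--     # standard forward two-pointer subsequence test: is s a subsequence of t?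
--     i = 0
--     for c in t:
--         if i < len(s) and s[i] == c:
--             i += 1
--     return i == len(s)
--
--
-- def transform(A, B):
--     # anagram test by sort-and-compare
--     if sorted(A) != sorted(B):
--         return -1
--     n = len(B)
--     # the answer is n - k, where k is the largest k such that B[n-k:] is a
--     # subsequence of A; that predicate is monotone in k, so binary-search k
--     lo, hi = 0, n
--     while lo < hi:
--         mid = (lo + hi + 1) // 2
--         if _is_subseq(B[n - mid:], A):
--             lo = mid
--         else:
--             hi = mid - 1
--     return n - lo
-- ===== Notes on version B (the rewrite author's own statement) =====
-- stated objective: alternative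
-- what changed: B replaces A's single backward greedy pointer scan (after a dict difference-counter anagram check) with a sort-and-compare anagram test plus a binary search over the length k of the longest suffix of B that is a subsequence of A, each candidate k checked with a forward two-pointer subsequence test.
import Mathlib
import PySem

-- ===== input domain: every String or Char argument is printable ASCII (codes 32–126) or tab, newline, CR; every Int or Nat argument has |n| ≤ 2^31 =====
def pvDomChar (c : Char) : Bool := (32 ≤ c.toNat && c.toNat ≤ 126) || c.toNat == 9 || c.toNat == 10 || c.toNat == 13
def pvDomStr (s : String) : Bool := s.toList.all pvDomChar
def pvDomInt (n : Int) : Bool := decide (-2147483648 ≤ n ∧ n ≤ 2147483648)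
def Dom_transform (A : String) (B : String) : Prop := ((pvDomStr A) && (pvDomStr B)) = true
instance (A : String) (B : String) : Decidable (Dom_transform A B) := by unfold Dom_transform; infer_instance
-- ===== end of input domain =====

-- B replaces A's backward greedy pointer scan (after a dict difference-counter anagram
-- check) with a sort-and-compare anagram test plus a binary search over the length k of
-- the longest suffix of B that is a subsequence of A, each k checked with a forward
-- two-pointer subsequence test (objective: alternative algorithm).

-- ===== PORT A =====
def transform (A : String) (B : String) : Int :=
  let d : PySem.Dict Char Int := PySem.Dict.empty
  let d := A.toList.foldl (fun d ch => d.insert ch (d.getD ch 0 + 1)) d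
  let d := B.toList.foldl (fun d ch => d.insert ch (d.getD ch 0 - 1)) d
  if d.values.any (fun v => v != 0) then -1
  else
    let j : Int := PySem.Str.len B - 1
    -- for ch in A[::-1]: B[j] is only ever evaluated at an in-range j here, so the
    -- IndexError default '?' is never the value Python would have raised on
    let j := ((PySem.List.slice? A.toList none none (-1)).getD []).foldl
      (fun (j : Int) ch => if (PySem.List.pyGet? B.toList j).getD '?' == ch then j - 1 else j) j
    j + 1

-- ===== PORT B =====
-- forward two-pointer subsequence test (_is_subseq in Source B); i < len(s) guards s[i]
def isSubseqB (s t : List Char) : Bool :=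
  (t.foldl (fun (i : Nat) c => if i < s.length ∧ s.getD i '?' = c then i + 1 else i) 0) == s.length

-- the while-loop of Source B; lo, hi are nonnegative Python ints, so Nat and Python's
-- (lo+hi+1)//2 floor division agree with Nat arithmetic exactly
def bsearchB (ok : Nat → Bool) (lo hi : Nat) : Nat :=
  if h : lo < hi then
    -- mid = (lo + hi + 1) // 2, inlined
    if ok ((lo + hi + 1) / 2) then bsearchB ok ((lo + hi + 1) / 2) hi
    else bsearchB ok lo ((lo + hi + 1) / 2 - 1)
  else lo
termination_by hi - lo
decreasing_by
  · omega
  · omega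

def transform_alt (A : String) (B : String) : Int :=
  if PySem.List.sorted A.toList (fun x => x) false ≠ PySem.List.sorted B.toList (fun x => x) false then -1
  else
    let n := B.toList.length
    -- B[n - mid:] with 0 ≤ n - mid ≤ n is exactly List.drop (n - mid)
    let lo := bsearchB (fun mid => isSubseqB (B.toList.drop (n - mid)) A.toList) 0 n
    (n : Int) - (lo : Int)

-- ===== PRECONDITION & SPEC =====
def Spec_transform (A : String) (B : String) (out : Int) : Prop := out = transform_alt A B
instance (A : String) (B : String) (out : Int) : Decidable (Spec_transform A B out) := by unfold Spec_transform; infer_instance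

-- ===== CLAIM (what is proved, stated in full; the proofs are below) =====
def Claim_equal_transform : Prop := ∀ (A : String) (B : String), Dom_transform A B → Spec_transform A B (transform A B)

-- ===== LEMMAS AND PROOFS =====

-- the '-1' counting loop of A, analogous to PySem.Dict.getD_foldl_insert_add_one
theorem getD_foldl_insert_sub_one (l : List Char) (d : PySem.Dict Char Int) (v : Char) :
    (l.foldl (fun d x => d.insert x (d.getD x 0 - 1)) d).getD v 0 = d.getD v 0 - l.count v := by
  induction l generalizing d with
  | nil => simp
  | cons x t ih =>
      simp only [List.foldl_cons, ih, PySem.Dict.getD_insert, List.count_cons]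
      by_cases h : v = x
      · subst h; simp; omega
      · have : ¬ (x == v) = true := by simpa using fun e => h e.symm
        simp [h, this]

-- the final dict's lookup is the count difference
theorem getD_final (A B : String) (v : Char) :
    ((B.toList.foldl (fun d ch => d.insert ch (d.getD ch 0 - 1))
        (A.toList.foldl (fun d ch => d.insert ch (d.getD ch 0 + 1)) (PySem.Dict.empty : PySem.Dict Char Int))).getD v 0)
      = (A.toList.count v : Int) - (B.toList.count v : Int) := by
  rw [getD_foldl_insert_sub_one, PySem.Dict.getD_foldl_insert_add_one]
  simp

-- the truthiness test on d.values is the anagram test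
theorem any_values_false_iff (A B : String) :
    ((B.toList.foldl (fun d ch => d.insert ch (d.getD ch 0 - 1))
        (A.toList.foldl (fun d ch => d.insert ch (d.getD ch 0 + 1)) (PySem.Dict.empty : PySem.Dict Char Int))).values.any (fun v => v != 0)) = false
      ↔ A.toList.Perm B.toList := by
  set d2 := (B.toList.foldl (fun d ch => d.insert ch (d.getD ch 0 - 1))
        (A.toList.foldl (fun d ch => d.insert ch (d.getD ch 0 + 1)) (PySem.Dict.empty : PySem.Dict Char Int))) with hd2
  have hnodup : d2.keys.Nodup := by
    apply PySem.Dict.nodup_keys_foldl_insert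
    apply PySem.Dict.nodup_keys_foldl_insert
    exact PySem.Dict.nodup_keys_empty
  have hvals : d2.values = d2.keys.map (fun k => d2.getD k 0) :=
    PySem.Dict.values_eq_map_keys d2 hnodup 0
  have hget : ∀ v, d2.getD v 0 = (A.toList.count v : Int) - (B.toList.count v : Int) := by
    intro v; rw [hd2]; exact getD_final A B v
  rw [List.perm_iff_count]
  constructor
  · intro h v
    by_cases hm : v ∈ d2.keys
    · have hz : d2.getD v 0 = 0 := by
        have hmem : d2.getD v 0 ∈ d2.values := by
          rw [hvals]; exact List.mem_map_of_mem hm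
        have := (List.any_eq_false.mp h) _ hmem
        simpa using this
      have := hget v; omega
    · have hc : d2.contains v = false := by
        by_contra hc
        exact hm ((PySem.Dict.contains_iff_mem_keys d2 v).mp (by simpa using hc))
      have hz : d2.getD v 0 = 0 := PySem.Dict.getD_of_not_contains d2 0 hc
      have := hget v; omega
  · intro h
    rw [hvals, List.any_eq_false]
    intro x hx
    obtain ⟨k, _, rfl⟩ := List.mem_map.mp hx
    have := hget k
    have hk := h k
    simp only [bne_iff_ne, ne_eq, Decidable.not_not]
    omega

-- greedy match count: scanning ra forward, advance through rb on each match
def gcount : List Char → List Char → Nat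
  | [], _ => 0
  | _ :: ra, [] => gcount ra []
  | a :: ra, b :: rb => if a = b then gcount ra rb + 1 else gcount ra (b :: rb)

theorem gcount_nil_right (ra : List Char) : gcount ra [] = 0 := by
  induction ra with
  | nil => rfl
  | cons a ra ih => simpa [gcount] using ih

theorem gcount_le_right (ra rb : List Char) : gcount ra rb ≤ rb.length := by
  induction ra generalizing rb with
  | nil => simp [gcount]
  | cons a ra ih =>
      cases rb with
      | nil => simp [gcount_nil_right]
      | cons b rb =>
          by_cases h : a = b
          · simpa [gcount, h] using ih rb
          · have := ih (b :: rb); simpa [gcount, h] using this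

-- greedy achieves its count: the matched prefix is a sublist
theorem gcount_take_sublist (ra rb : List Char) : List.Sublist (rb.take (gcount ra rb)) ra := by
  induction ra generalizing rb with
  | nil => simp [gcount]
  | cons a ra ih =>
      cases rb with
      | nil => simp
      | cons b rb =>
          by_cases h : a = b
          · subst h
            simpa [gcount, List.take_succ_cons] using List.Sublist.cons₂ a (ih rb)
          · exact List.Sublist.cons a (by simpa [gcount, h] using ih (b :: rb))

theorem gcount_cons_right_le (ra : List Char) : ∀ (b : Char) (rb : List Char),
    gcount ra (b :: rb) ≤ 1 + gcount ra rb := by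
  induction ra with
  | nil => intro b rb; simp [gcount]
  | cons a ra ih =>
      intro b rb
      cases rb with
      | nil =>
          have h1 := ih b []
          simp only [gcount, gcount_nil_right] at *
          split_ifs with hab <;> omega
      | cons c rb' =>
          have h1 := ih c rb'
          have h2 := ih b (c :: rb')
          simp only [gcount] at *
          split_ifs at * with hab hac <;> omega

theorem gcount_mono_left (a : Char) (ra rb : List Char) :
    gcount ra rb ≤ gcount (a :: ra) rb := by
  cases rb with
  | nil => simp [gcount_nil_right]
  | cons b rb =>
      by_cases h : a = b
      · have := gcount_cons_right_le ra b rb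
        simp [gcount, h]; omega
      · simp [gcount, h]

-- greedy is optimal: any matched prefix length is at most the greedy count
theorem gcount_ge_of_take_sublist (ra rb : List Char) (k : Nat)
    (hk : k ≤ rb.length) (hs : List.Sublist (rb.take k) ra) : k ≤ gcount ra rb := by
  induction ra generalizing rb k with
  | nil =>
      have h0 : rb.take k = [] := List.sublist_nil.mp hs
      have h1 : min k rb.length = 0 := by simpa using congrArg List.length h0
      simp only [gcount]
      omega
  | cons a ra ih =>
      rcases List.sublist_cons_iff.mp hs with h | ⟨l, hl, hlsub⟩
      · exact le_trans (ih rb k hk h) (gcount_mono_left a ra rb)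
      · cases rb with
        | nil => simp at hl
        | cons b rb =>
            cases k with
            | zero => omega
            | succ k' =>
                simp [List.take_succ_cons] at hl
                obtain ⟨hb, hl'⟩ := hl
                subst hb
                subst hl'
                have hk' : k' ≤ rb.length := by simp at hk; omega
                have := ih rb k' hk' hlsub
                simp [gcount]
                omega

-- characterization: for k ≤ |rb|, the k-prefix of rb is a sublist of ra iff k ≤ gcount
theorem take_sublist_iff_le_gcount (ra rb : List Char) (k : Nat) (hk : k ≤ rb.length) :
    List.Sublist (rb.take k) ra ↔ k ≤ gcount ra rb := by
  constructor
  · exact gcount_ge_of_take_sublist ra rb k hk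
  · intro h
    have h1 : rb.take k = (rb.take (gcount ra rb)).take k := by
      rw [List.take_take, Nat.min_def]; simp [h]
    rw [h1]
    exact (List.take_sublist k _).trans (gcount_take_sublist ra rb)

-- the forward two-pointer fold computes the greedy count
theorem foldl_subseq_eq_gcount (t : List Char) (s : List Char) (i0 : Nat) (h : i0 ≤ s.length) :
    t.foldl (fun (i : Nat) c => if i < s.length ∧ s.getD i '?' = c then i + 1 else i) i0
      = i0 + gcount t (s.drop i0) := by
  induction t generalizing i0 with
  | nil => simp [gcount]
  | cons c t ih =>
      by_cases hi : i0 < s.length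
      · have hdrop : s.drop i0 = s[i0] :: s.drop (i0 + 1) := List.drop_eq_getElem_cons hi
        have hgetD : s.getD i0 '?' = s[i0] := by
          simp [List.getD, List.getElem?_eq_getElem hi]
        by_cases hc : s[i0] = c
        · have : (i0 < s.length ∧ s.getD i0 '?' = c) := ⟨hi, by rw [hgetD, hc]⟩
          rw [List.foldl_cons, if_pos this, ih (i0 + 1) (by omega), hdrop]
          simp [gcount, hc.symm]
          omega
        · have hnc : ¬ (i0 < s.length ∧ s.getD i0 '?' = c) := by
            rintro ⟨_, he⟩; exact hc (by rw [← hgetD, he])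
          rw [List.foldl_cons, if_neg hnc, ih i0 h, hdrop]
          have : ¬ (c = s[i0]) := fun e => hc e.symm
          simp [gcount, this]
      · have hi0 : i0 = s.length := by omega
        have hnc : ¬ (i0 < s.length ∧ s.getD i0 '?' = c) := by rintro ⟨h1, _⟩; omega
        rw [List.foldl_cons, if_neg hnc, ih i0 h]
        simp [hi0, gcount]

theorem isSubseqB_iff_sublist (s t : List Char) : isSubseqB s t = true ↔ List.Sublist s t := by
  unfold isSubseqB
  rw [foldl_subseq_eq_gcount t s 0 (by omega)]
  simp only [List.drop_zero, Nat.zero_add, beq_iff_eq]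
  constructor
  · intro h
    have : List.Sublist (s.take (gcount t s)) t := gcount_take_sublist t s
    simpa [h] using this
  · intro h
    have h1 : s.length ≤ gcount t s :=
      gcount_ge_of_take_sublist t s s.length (le_refl _) (by simpa using h)
    have h2 := gcount_le_right t s
    omega

-- the binary search returns the threshold of a monotone predicate
theorem bsearchB_eq (okf : Nat → Bool) (G n : Nat)
    (hok : ∀ k, k ≤ n → okf k = decide (k ≤ G)) :
    ∀ (d lo hi : Nat), hi - lo ≤ d → lo ≤ G → G ≤ hi → hi ≤ n → bsearchB okf lo hi = G := by
  intro d
  induction d with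
  | zero =>
      intro lo hi hd hlo hhi hn
      have : ¬ lo < hi := by omega
      rw [bsearchB, dif_neg this]
      omega
  | succ d ih =>
      intro lo hi hd hlo hhi hn
      by_cases hlt : lo < hi
      · rw [bsearchB, dif_pos hlt]
        have hmid1 : lo + 1 ≤ (lo + hi + 1) / 2 := by omega
        have hmid2 : (lo + hi + 1) / 2 ≤ hi := by omega
        by_cases hG : (lo + hi + 1) / 2 ≤ G
        · rw [hok _ (by omega), decide_eq_true hG]
          exact ih _ hi (by omega) hG hhi hn
        · rw [hok _ (by omega)]
          simp only [decide_eq_false hG]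
          exact ih lo _ (by omega) hlo (by omega) (by omega)
      · rw [bsearchB, dif_neg hlt]; omega

-- A's suffix-matching loop computes |B| - 1 - greedy-count over the reversed strings
theorem a_loop_eq_gcount (lb : List Char) :
    ∀ (l : List Char) (c : Nat), c + l.length ≤ lb.length →
    l.foldl (fun (j : Int) ch => if (PySem.List.pyGet? lb j).getD '?' == ch then j - 1 else j)
        ((lb.length : Int) - 1 - c)
      = (lb.length : Int) - 1 - ((c : Int) + (gcount l (lb.reverse.drop c) : Int)) := by
  intro l
  induction l with
  | nil => intro c _; simp [gcount]
  | cons ch t ih =>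
      intro c hc
      have hclt : c < lb.length := by simp at hc; omega
      have hrlen : lb.reverse.length = lb.length := List.length_reverse
      have hget : PySem.List.pyGet? lb ((lb.length : Int) - 1 - c) = some lb.reverse[c] := by
        rw [PySem.List.pyGet?_of_nonneg lb (by omega)]
        have hm : (((lb.length : Int) - 1 - c)).toNat = lb.length - 1 - c := by omega
        rw [hm, ← List.getElem?_reverse hclt]
        exact List.getElem?_eq_getElem (by omega)
      have hdrop : lb.reverse.drop c = lb.reverse[c] :: lb.reverse.drop (c + 1) :=
        List.drop_eq_getElem_cons (by omega)
      rw [List.foldl_cons, hget]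
      by_cases hcc : ch = lb.reverse[c]
      · have hbeq : ((some lb.reverse[c]).getD '?' == ch) = true := by simp [hcc]
        rw [if_pos hbeq]
        have harith : (lb.length : Int) - 1 - c - 1 = (lb.length : Int) - 1 - ((c + 1 : Nat) : Int) := by
          push_cast; ring
        rw [harith, ih (c + 1) (by simp at hc ⊢; omega), hdrop]
        simp [gcount, hcc]
        omega
      · have hbeq : ¬ ((some lb.reverse[c]).getD '?' == ch) = true := by
          simp only [Option.getD_some, beq_iff_eq]
          exact fun e => hcc e.symm
        rw [if_neg hbeq, ih c (by simp at hc ⊢; omega), hdrop]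
        have hgc : gcount (ch :: t) (lb.reverse[c] :: lb.reverse.drop (c + 1))
            = gcount t (lb.reverse[c] :: lb.reverse.drop (c + 1)) := by
          simp only [gcount]; rw [if_neg hcc]
        rw [hgc]

-- ===== VERDICT (by name: the statement is the Claim_ definition above) =====
theorem transform_spec : Claim_equal_transform := by
  intro A B _
  unfold Spec_transform transform transform_alt
  simp only [PySem.List.slice?_none_none_neg_one, Option.getD_some, PySem.Str.len_eq]
  by_cases hp : A.toList.Perm B.toList
  · have hany := (any_values_false_iff A B).mpr hp
    have hsort : PySem.List.sorted A.toList (fun x => x) false = PySem.List.sorted B.toList (fun x => x) false :=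
      (PySem.List.sorted_id_eq_sorted_id_iff_perm _ _).mpr hp
    rw [hany, if_neg (Bool.false_ne_true), if_neg (by simp [hsort])]
    have hlen : A.toList.length = B.toList.length := hp.length_eq
    -- A's side: value of the greedy loop
    have hA := a_loop_eq_gcount B.toList A.toList.reverse 0 (by simp [hlen])
    have h0 : (B.toList.length : Int) - 1 - (0 : Nat) = (B.toList.length : Int) - 1 := by simp
    rw [h0] at hA
    rw [hA]
    -- B's side: the binary search returns the greedy count
    set n := B.toList.length with hn
    set G := gcount A.toList.reverse (B.toList.reverse.drop 0) with hG
    have hGle : G ≤ n := by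
      rw [hG]
      have := gcount_le_right A.toList.reverse (B.toList.reverse.drop 0)
      simpa using this
    have hok : ∀ k, k ≤ n → isSubseqB (B.toList.drop (n - k)) A.toList = decide (k ≤ G) := by
      intro k hk
      have hrev : (B.toList.drop (n - k)).reverse = B.toList.reverse.take k := by
        rw [List.reverse_drop]
        congr 1
        omega
      have hsub : List.Sublist (B.toList.drop (n - k)) A.toList ↔ k ≤ G := by
        rw [← List.reverse_sublist, hrev, hG, List.drop_zero]
        exact take_sublist_iff_le_gcount A.toList.reverse B.toList.reverse k (by simpa using hk)
      by_cases hkg : k ≤ G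
      · rw [decide_eq_true hkg]
        exact (isSubseqB_iff_sublist _ _).mpr (hsub.mpr hkg)
      · rw [decide_eq_false hkg]
        by_contra hne
        have : isSubseqB (B.toList.drop (n - k)) A.toList = true := by
          cases hb : isSubseqB (B.toList.drop (n - k)) A.toList with
          | false => exact absurd hb hne
          | true => rfl
        exact hkg (hsub.mp ((isSubseqB_iff_sublist _ _).mp this))
    have hbs := bsearchB_eq (fun mid => isSubseqB (B.toList.drop (n - mid)) A.toList) G n hok n 0 n (by omega) (by omega) hGle (le_refl n)
    rw [hbs]
    push_cast
    ring
  · have hany : ((B.toList.foldl (fun d ch => d.insert ch (d.getD ch 0 - 1))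
        (A.toList.foldl (fun d ch => d.insert ch (d.getD ch 0 + 1)) (PySem.Dict.empty : PySem.Dict Char Int))).values.any (fun v => v != 0)) = true := by
      by_contra h
      exact hp ((any_values_false_iff A B).mp (by simpa using h))
    have hsort : PySem.List.sorted A.toList (fun x => x) false ≠ PySem.List.sorted B.toList (fun x => x) false := by
      intro h
      exact hp ((PySem.List.sorted_id_eq_sorted_id_iff_perm _ _).mp h)
    rw [hany, if_pos rfl, if_pos hsort]
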